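-- pv_equiv track=rewrite | github.com/relastle/vim-nayvy | python3/pydra/importing/utils.py | get_import_block_indices
-- ===== SOURCE A (Python) =====
-- from typing import List, Tuple
--
-- def get_import_block_indices(lines: List[str]) -> List[Tuple[int, int]]:
--     '''
--     Returns:
--         [
--             (1st block's start begin(inclusive), 1st block's end(exclusive)),
--             (2nd block's start begin(inclusive), 2nd block's end(exclusive)),
--             (3rd block's start begin(inclusive), 3rd block's end(exclusive)),
--             ...
--             ]
--     '''
--     res = []
--     in_block = False
--     start_index = -1
--     for i, line in enumerate(lines):
--         if (
--             not in_block and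
--             (
--                 line.startswith('import ') or
--                 line.startswith('from ')
--             )
--         ):
--             in_block = True
--             start_index = i
--             continue
--         elif in_block and line == '':
--             in_block = False
--             res.append((start_index, i))
--             start_index = -1
--     if start_index >= 0:
--         res.append((start_index, i + 1))
--     return res
-- ===== SOURCE B (Python) =====
-- from typing import List, Tuple
--
-- def get_import_block_indices(lines: List[str]) -> List[Tuple[int, int]]:
--     # Partition lines into maximal blank-delimited segments; each segment whose
--     # first import/from line is at k contributes (k, segment_end).
--     res = []
--     i, n = 0, len(lines)
--     while i < n:
--         if lines[i] == '':
--             i += 1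
--             continue
--         j = i
--         while j < n and lines[j] != '':
--             j += 1
--         k = next((k for k in range(i, j)
--                   if lines[k].startswith(('import ', 'from '))), None)
--         if k is not None:
--             res.append((k, j))
--         i = j
--     return res
-- ===== Notes on version B (the rewrite author's own statement) =====
-- stated objective: alternative
-- what changed: Replaces A's single flat in_block/start_index state machine (with a post-loop fixup appending the EOF-terminated block) by a two-level partition-then-scan: split lines into maximal blank-delimited segments, then for each segment emit (index of its first import/from line, segment end) if one exists.
import Mathlib
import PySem

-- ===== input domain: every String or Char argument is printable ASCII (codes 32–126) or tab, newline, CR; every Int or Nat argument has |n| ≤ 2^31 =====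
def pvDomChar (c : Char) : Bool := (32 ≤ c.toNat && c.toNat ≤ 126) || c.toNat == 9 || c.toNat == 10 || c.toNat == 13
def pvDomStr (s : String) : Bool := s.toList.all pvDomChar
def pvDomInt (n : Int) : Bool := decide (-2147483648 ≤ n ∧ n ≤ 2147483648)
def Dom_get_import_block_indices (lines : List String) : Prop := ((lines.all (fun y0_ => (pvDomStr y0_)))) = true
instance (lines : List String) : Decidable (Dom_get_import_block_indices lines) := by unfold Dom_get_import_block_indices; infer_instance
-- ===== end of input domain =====

-- B is an alternative decomposition: partition-then-scan instead of A's flat state machine. Both total; return values only.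

-- ===== PORT A =====
-- the for-loop: state (res, in_block, start_index, last i); i carried since Python reads it after the loop
def goA : List String → Int → (List (Int × Int) × Bool × Int × Int) → (List (Int × Int) × Bool × Int × Int)
  | [], _, st => st
  | l :: r, i, (res, inb, si, _) =>
    if !inb && (PySem.Str.startswith l "import " || PySem.Str.startswith l "from ") then
      goA r (i + 1) (res, true, i, i)
    else if inb && (l == "") then
      goA r (i + 1) (res ++ [(si, i)], false, -1, i)
    else
      goA r (i + 1) (res, inb, si, i)

def get_import_block_indices (lines : List String) : List (Int × Int) :=
  let st := goA lines 0 ([], false, -1, -1)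
  if st.2.2.1 ≥ 0 then st.1 ++ [(st.2.2.1, st.2.2.2 + 1)] else st.1

-- ===== PORT B =====
def impLine (s : String) : Bool :=
  PySem.Str.startswith s "import " || PySem.Str.startswith s "from "

-- outer while loop of B: skip blanks; at a nonblank line take the whole segment, scan it for the first import line
def goB : List String → Int → List (Int × Int)
  | [], _ => []
  | l :: r, i =>
    if l == "" then goB r (i + 1)
    else
      let seg := l :: r.takeWhile (fun s => s != "")
      let j := i + (seg.length : Int)
      (match seg.findIdx? impLine with
       | some k => [((i + (k : Int), j) : Int × Int)]
       | none => []) ++ goB (r.dropWhile (fun s => s != "")) j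
termination_by ls _ => ls.length
decreasing_by
  · simp
  · exact Nat.lt_succ_of_le (List.length_dropWhile_le _ _)

def get_import_block_indices_alt (lines : List String) : List (Int × Int) := goB lines 0

-- ===== PRECONDITION & SPEC =====
def Spec_get_import_block_indices (lines : List String) (out : List (Int × Int)) : Prop := out = get_import_block_indices_alt lines
instance (lines : List String) (out : List (Int × Int)) : Decidable (Spec_get_import_block_indices lines out) := by unfold Spec_get_import_block_indices; infer_instance

-- ===== CLAIM (what is proved, stated in full; the proofs are below) =====
def Claim_equal_get_import_block_indices : Prop := ∀ (lines : List String), Dom_get_import_block_indices lines → Spec_get_import_block_indices lines (get_import_block_indices lines)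

-- ===== LEMMAS AND PROOFS =====

-- A's post-loop fixup
def finishA (st : List (Int × Int) × Bool × Int × Int) : List (Int × Int) :=
  if st.2.2.1 ≥ 0 then st.1 ++ [(st.2.2.1, st.2.2.2 + 1)] else st.1

-- what A computes from an in-block state: scan to the next blank (or EOF), close the block, resume goB
def closeB : List String → Int → Int → List (Int × Int)
  | [], i, si => [(si, i)]
  | l :: r, i, si => if l == "" then (si, i) :: goB r (i + 1) else closeB r (i + 1) si

lemma goB_nil (i : Int) : goB [] i = [] := by
  conv_lhs => unfold goB

lemma goB_blank (r : List String) (i : Int) : goB ("" :: r) i = goB r (i + 1) := by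
  conv_lhs => unfold goB
  simp

lemma goB_cons (l : String) (r : List String) (i : Int) (h : l ≠ "") : goB (l :: r) i =
      (match (l :: r.takeWhile (fun s => s != "")).findIdx? impLine with
       | some k => [((i + (k : Int), i + ((l :: r.takeWhile (fun s => s != "")).length : Int)) : Int × Int)]
       | none => []) ++ goB (r.dropWhile (fun s => s != "")) (i + ((l :: r.takeWhile (fun s => s != "")).length : Int)) := by
  conv_lhs => unfold goB
  simp [h]

lemma impLine_empty : impLine "" = false := by decide

lemma closeB_eq (r : List String) (i si : Int) :
    closeB r i si =
      (si, i + ((r.takeWhile (fun s => s != "")).length : Int)) ::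
        goB (r.dropWhile (fun s => s != "")) (i + ((r.takeWhile (fun s => s != "")).length : Int)) := by
  induction r generalizing i with
  | nil => simp [closeB, goB_nil]
  | cons x r ih =>
    by_cases hx : x = ""
    · subst hx
      simp [closeB, goB_blank]
    · simp only [closeB, List.takeWhile_cons, List.dropWhile_cons,
        show (x != "") = true by simp [hx], if_pos, List.length_cons]
      rw [if_neg (by simp [hx]), ih (i + 1)]
      push_cast
      ring_nf

lemma goB_import (l : String) (r : List String) (i : Int)
    (himp : impLine l = true) : goB (l :: r) i = closeB r (i + 1) i := by
  have hl : l ≠ "" := by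
    intro h; rw [h, impLine_empty] at himp; exact Bool.false_ne_true himp
  rw [closeB_eq, goB_cons l r i hl]
  simp only [List.findIdx?_cons, himp, List.length_cons, if_true]
  push_cast
  ring_nf
  simp

lemma goB_skip (l : String) (r : List String) (i : Int)
    (hl : l ≠ "") (himp : impLine l = false) : goB (l :: r) i = goB r (i + 1) := by
  cases r with
  | nil =>
    rw [goB_cons l [] i hl]
    simp [List.findIdx?_cons, himp, goB_nil]
  | cons x r' =>
    by_cases hx : x = ""
    · subst hx
      rw [goB_blank, goB_cons l _ i hl]
      simp [List.findIdx?_cons, himp, goB_blank]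
    · rw [goB_cons l _ i hl, goB_cons x r' (i + 1) hx]
      simp only [List.takeWhile_cons, List.dropWhile_cons,
        show (x != "") = true by simp [hx], if_pos, List.length_cons]
      rw [List.findIdx?_cons, himp]
      cases hfi : (x :: List.takeWhile (fun s => s != "") r').findIdx? impLine with
      | none => simp; ring_nf
      | some k =>
        simp only [Bool.false_eq_true, if_false, Option.map_some, List.cons_append,
          List.nil_append, List.cons.injEq, Prod.mk.injEq]
        refine ⟨⟨by push_cast; ring, by push_cast; ring⟩, by push_cast; ring_nf⟩

-- the central simultaneous invariant: A's loop from any not-in-block / in-block state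
lemma key (ls : List String) :
    (∀ (i : Int) (acc : List (Int × Int)), 0 ≤ i →
        finishA (goA ls i (acc, false, -1, i - 1)) = acc ++ goB ls i)
    ∧ (∀ (i si : Int) (acc : List (Int × Int)), 0 ≤ i → 0 ≤ si →
        finishA (goA ls i (acc, true, si, i - 1)) = acc ++ closeB ls i si) := by
  induction ls with
  | nil =>
    constructor
    · intro i acc _; simp [goA, goB_nil, finishA]
    · intro i si acc _ hsi
      simp only [goA, closeB, finishA]
      rw [if_pos (by omega)]
      simp
  | cons l r ih =>
    constructor
    · intro i acc hi
      by_cases hl : l = ""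
      · subst hl
        simp only [goA, Bool.not_false, Bool.true_and]
        rw [if_neg (by have := impLine_empty; simp [impLine] at this; simp [this]),
          if_neg (by simp)]
        have := ih.1 (i + 1) acc (by omega)
        rw [show i + 1 - 1 = i by ring] at this
        rw [this, goB_blank]
      · cases himp : impLine l with
        | true =>
          simp only [goA, Bool.not_false, Bool.true_and]
          rw [if_pos (by simpa [impLine] using himp)]
          have := ih.2 (i + 1) i acc (by omega) hi
          rw [show i + 1 - 1 = i by ring] at this
          rw [this, goB_import l r i himp]
        | false =>
          simp only [goA, Bool.not_false, Bool.true_and]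
          rw [if_neg (by simpa [impLine] using himp), if_neg (by simp)]
          have := ih.1 (i + 1) acc (by omega)
          rw [show i + 1 - 1 = i by ring] at this
          rw [this, goB_skip l r i hl himp]
    · intro i si acc hi hsi
      by_cases hl : l = ""
      · subst hl
        simp only [goA, Bool.not_true, Bool.false_and]
        rw [if_neg (by simp), if_pos (by simp)]
        have := ih.1 (i + 1) (acc ++ [(si, i)]) (by omega)
        rw [show i + 1 - 1 = i by ring] at this
        rw [this, closeB]
        simp
      · simp only [goA, Bool.not_true, Bool.false_and]
        rw [if_neg (by simp), if_neg (by simp [hl])]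
        have := ih.2 (i + 1) si acc (by omega) hsi
        rw [show i + 1 - 1 = i by ring] at this
        rw [this, closeB, if_neg (by simp [hl])]

-- ===== VERDICT (by name: the statement is the Claim_ definition above) =====
theorem get_import_block_indices_spec : Claim_equal_get_import_block_indices := by
  intro lines _
  unfold Spec_get_import_block_indices get_import_block_indices get_import_block_indices_alt
  have := (key lines).1 0 [] (by omega)
  simpa [finishA] using this
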